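-- pv_equiv track=rewrite | github.com/s214684/mariokart-tournament | services.py | human_distribution
-- ===== SOURCE A (Python) =====
-- from typing import List, Tuple, Dict, Optional, Set
--
-- def human_distribution(total_appearances: int) -> List[int]:
--     """Return a list of human counts per match that minimizes matches, prefers 3-human games,
--     and never creates a 1-human match. Converts (4,2) -> (3,3)."""
--     if total_appearances < 2:
--         return []
--     f = total_appearances // 4
--     rem = total_appearances % 4
--     counts = [4] * f
--     if rem == 1 and f >= 1:
--         counts.pop()
--         counts.extend([3, 2])
--     elif rem == 2:
--         counts.append(2)
--     elif rem == 3: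
--         counts.append(3)
--     counts.sort()
--     while 2 in counts and 4 in counts:
--         counts.remove(2)
--         counts.remove(4)
--         counts.extend([3, 3])
--     return counts
-- ===== SOURCE B (Python) =====
-- from typing import List
--
-- def human_distribution(total_appearances: int) -> List[int]:
--     """Closed-form distribution: matches of sizes 3/4 (plus 2-corners), no loops or sorting."""
--     if total_appearances < 2:
--         return []
--     f, rem = divmod(total_appearances, 4)
--     if rem == 0:
--         return [4] * f
--     if rem == 1:
--         return [2, 3] if f == 1 else [3] + [4] * (f - 2) + [3, 3]
--     if rem == 2:
--         return [2] if f == 0 else [4] * (f - 1) + [3, 3]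
--     return [3] + [4] * f
-- ===== Notes on version B (the rewrite author's own statement) =====
-- stated objective: simpler
-- what changed: B returns the result directly as a closed form for each remainder class of the match-count division, eliminating A's scratch list, its sort and its pair-rewrite while-loop.
import Mathlib
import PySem

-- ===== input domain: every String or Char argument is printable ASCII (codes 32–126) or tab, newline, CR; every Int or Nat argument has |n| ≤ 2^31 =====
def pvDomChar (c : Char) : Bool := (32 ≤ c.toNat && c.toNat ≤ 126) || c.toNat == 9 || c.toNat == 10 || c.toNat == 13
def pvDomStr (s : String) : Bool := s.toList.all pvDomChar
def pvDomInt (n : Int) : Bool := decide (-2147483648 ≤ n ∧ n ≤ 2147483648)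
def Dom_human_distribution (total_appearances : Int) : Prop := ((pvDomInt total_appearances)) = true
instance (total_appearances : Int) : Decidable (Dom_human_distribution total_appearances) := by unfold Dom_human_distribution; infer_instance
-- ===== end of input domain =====

-- B replaces A's build-sort-rewrite pipeline by a direct closed form per residue mod 4 (simpler).

-- ===== PORT A =====
-- the 'while 2 in counts and 4 in counts' loop; fuel is only a totality guard (counts.length + 1 iterations suffice)
def pvALoop : Nat → List Int → List Int
  | 0, counts => counts
  | fuel + 1, counts =>
    if 2 ∈ counts ∧ 4 ∈ counts then
      let c1 := (PySem.List.remove? counts 2).getD counts   -- counts.remove(2)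
      let c2 := (PySem.List.remove? c1 4).getD c1           -- counts.remove(4)
      pvALoop fuel (c2 ++ [3, 3])                           -- counts.extend([3, 3])
    else counts

def human_distribution (total_appearances : Int) : List Int :=
  if total_appearances < 2 then []
  else
    let f := PySem.Int.floordiv total_appearances 4
    let rem := PySem.Int.mod total_appearances 4
    let counts := PySem.List.pyRepeat [(4 : Int)] f          -- [4] * f
    let counts :=
      if rem = 1 ∧ 1 ≤ f then counts.dropLast ++ [3, 2]      -- counts.pop() (result discarded); counts.extend([3, 2])
      else if rem = 2 then counts ++ [2]
      else if rem = 3 then counts ++ [3]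
      else counts
    let counts := PySem.List.sorted counts (fun x => x) false -- counts.sort()
    pvALoop (counts.length + 1) counts

-- ===== PORT B =====
def human_distribution_alt (total_appearances : Int) : List Int :=
  if total_appearances < 2 then []
  else
    let f := PySem.Int.floordiv total_appearances 4          -- divmod(total_appearances, 4)
    let rem := PySem.Int.mod total_appearances 4
    if rem = 0 then PySem.List.pyRepeat [(4 : Int)] f
    else if rem = 1 then
      if f = 1 then [2, 3] else [3] ++ PySem.List.pyRepeat [(4 : Int)] (f - 2) ++ [3, 3]
    else if rem = 2 then
      if f = 0 then [2] else PySem.List.pyRepeat [(4 : Int)] (f - 1) ++ [3, 3]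
    else [3] ++ PySem.List.pyRepeat [(4 : Int)] f

-- ===== PRECONDITION & SPEC =====
def Spec_human_distribution (total_appearances : Int) (out : List Int) : Prop := out = human_distribution_alt total_appearances
instance (total_appearances : Int) (out : List Int) : Decidable (Spec_human_distribution total_appearances out) := by unfold Spec_human_distribution; infer_instance

-- ===== CLAIM (what is proved, stated in full; the proofs are below) =====
def Claim_equal_human_distribution : Prop := ∀ (total_appearances : Int), Dom_human_distribution total_appearances → Spec_human_distribution total_appearances (human_distribution total_appearances)

-- ===== LEMMAS AND PROOFS =====

lemma pvALoop_no_two (fuel : Nat) (xs : List Int) (h : (2 : Int) ∉ xs) :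
    pvALoop fuel xs = xs := by
  cases fuel <;> simp [pvALoop, h]

lemma pvALoop_no_four (fuel : Nat) (xs : List Int) (h : (4 : Int) ∉ xs) :
    pvALoop fuel xs = xs := by
  cases fuel <;> simp [pvALoop, h]

lemma two_not_mem_rep (m : Nat) : (2 : Int) ∉ List.replicate m (4 : Int) := by
  simp [List.mem_replicate]

lemma sorted_rep (m : Nat) :
    PySem.List.sorted (List.replicate m (4 : Int)) (fun x => x) false = List.replicate m 4 :=
  PySem.List.sorted_eq_self_of_pairwise _ _ (List.pairwise_replicate.mpr (Or.inr le_rfl))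

lemma sorted_rep_append_one (m : Nat) (a : Int) (ha : a ≤ 4) :
    PySem.List.sorted (List.replicate m (4 : Int) ++ [a]) (fun x => x) false
      = a :: List.replicate m 4 := by
  apply PySem.List.sorted_id_eq_of_perm_of_pairwise
  · exact List.perm_append_comm (l₁ := [a])
  · refine List.pairwise_cons.mpr ⟨?_, List.pairwise_replicate.mpr (Or.inr le_rfl)⟩
    intro x hx
    rcases List.mem_replicate.mp hx with ⟨_, rfl⟩; exact ha

lemma sorted_rep_append_32 (m : Nat) :
    PySem.List.sorted (List.replicate m (4 : Int) ++ [3, 2]) (fun x => x) false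
      = 2 :: 3 :: List.replicate m 4 := by
  apply PySem.List.sorted_id_eq_of_perm_of_pairwise
  · exact (List.Perm.swap 3 2 _).trans (List.perm_append_comm (l₁ := [3, 2]))
  · refine List.pairwise_cons.mpr ⟨?_, List.pairwise_cons.mpr ⟨?_, List.pairwise_replicate.mpr (Or.inr le_rfl)⟩⟩
    · intro x hx
      rcases List.mem_cons.mp hx with rfl | hx
      · omega
      · rcases List.mem_replicate.mp hx with ⟨_, rfl⟩; omega
    · intro x hx
      rcases List.mem_replicate.mp hx with ⟨_, rfl⟩; omega

lemma remove4_rep (k : Nat) :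
    PySem.List.remove? (List.replicate (k + 1) (4 : Int)) 4 = some (List.replicate k 4) := by
  rw [List.replicate_succ]
  exact PySem.List.remove?_cons_self _ _

lemma pvALoop_two_cons (t : Nat) (k : Nat) :
    pvALoop (t + 1) (2 :: List.replicate (k + 1) (4 : Int))
      = List.replicate k 4 ++ [3, 3] := by
  have hmem : (2 : Int) ∈ 2 :: List.replicate (k + 1) (4 : Int) ∧
      (4 : Int) ∈ 2 :: List.replicate (k + 1) (4 : Int) := by
    constructor
    · exact List.mem_cons_self
    · exact List.mem_cons_of_mem _ (by simp [List.mem_replicate])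
  simp only [pvALoop, if_pos hmem, PySem.List.remove?_cons_self, Option.getD_some, remove4_rep]
  exact pvALoop_no_two _ _ (by simp [List.mem_replicate])

lemma pvALoop_two_three_cons (t : Nat) (k : Nat) :
    pvALoop (t + 1) (2 :: 3 :: List.replicate (k + 1) (4 : Int))
      = (3 :: List.replicate k 4) ++ [3, 3] := by
  have hmem : (2 : Int) ∈ 2 :: 3 :: List.replicate (k + 1) (4 : Int) ∧
      (4 : Int) ∈ 2 :: 3 :: List.replicate (k + 1) (4 : Int) := by
    constructor
    · exact List.mem_cons_self
    · exact List.mem_cons_of_mem _ (List.mem_cons_of_mem _ (by simp [List.mem_replicate]))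
  simp only [pvALoop, if_pos hmem, PySem.List.remove?_cons_self, Option.getD_some]
  rw [PySem.List.remove?_cons_of_ne _ (by norm_num : (3 : Int) ≠ 4), remove4_rep]
  simp only [Option.map_some, Option.getD_some]
  exact pvALoop_no_two _ _ (by simp [List.mem_replicate])

lemma ports_agree (n : Int) : human_distribution n = human_distribution_alt n := by
  unfold human_distribution human_distribution_alt
  by_cases hlt : n < 2
  · simp [hlt]
  · rw [if_neg hlt, if_neg hlt]
    have hge : (2 : Int) ≤ n := by omega
    have hf : PySem.Int.floordiv n 4 = n / 4 :=
      PySem.Int.floordiv_eq_ediv_of_pos (by norm_num)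
    have hr : PySem.Int.mod n 4 = n % 4 :=
      PySem.Int.mod_eq_emod_of_pos (by norm_num)
    have h0 : 0 ≤ n / 4 := by omega
    obtain ⟨m, hm⟩ : ∃ m : Nat, n / 4 = (m : Int) := ⟨(n / 4).toNat, by omega⟩
    rw [hf, hr, hm]
    simp only [PySem.List.pyRepeat_singleton, Int.toNat_natCast]
    have hcases : n % 4 = 0 ∨ n % 4 = 1 ∨ n % 4 = 2 ∨ n % 4 = 3 := by omega
    rcases hcases with h | h | h | h
    all_goals rw [h]
    · -- rem = 0
      rw [if_neg (by simp), if_neg (by norm_num), if_neg (by norm_num), if_pos rfl]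
      rw [sorted_rep]
      exact pvALoop_no_two _ _ (two_not_mem_rep m)
    · -- rem = 1 ; here f ≥ 1
      have hf1 : (1 : Int) ≤ (m : Int) := by omega
      rw [if_pos ⟨rfl, hf1⟩, if_neg (by norm_num), if_pos rfl]
      obtain ⟨k, rfl⟩ : ∃ k, m = k + 1 := ⟨m - 1, by omega⟩
      rw [List.replicate_succ', List.dropLast_concat, sorted_rep_append_32 k]
      cases k with
      | zero =>
        rw [if_pos (by norm_num)]
        rw [pvALoop_no_four _ _ (by simp)]
        simp
      | succ j =>
        rw [if_neg (by omega)]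
        rw [pvALoop_two_three_cons _ j]
        have hj : (((j + 1 + 1 : Nat) : Int) - 2).toNat = j := by omega
        rw [hj]
        simp
    · -- rem = 2
      rw [if_neg (by simp), if_pos rfl]
      rw [if_neg (by norm_num), if_neg (by norm_num), if_pos rfl]
      rw [sorted_rep_append_one m 2 (by norm_num)]
      cases m with
      | zero =>
        rw [if_pos (by norm_num)]
        rw [pvALoop_no_four _ _ (by simp)]
        simp
      | succ k =>
        rw [if_neg (by omega)]
        rw [pvALoop_two_cons _ k]
        have hk : (((k + 1 : Nat) : Int) - 1).toNat = k := by omega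
        rw [hk]
    · -- rem = 3
      rw [if_neg (by simp), if_neg (by norm_num), if_pos rfl]
      rw [if_neg (by norm_num), if_neg (by norm_num), if_neg (by norm_num)]
      rw [sorted_rep_append_one m 3 (by norm_num)]
      rw [pvALoop_no_two _ _ (by simp [List.mem_replicate])]
      simp

-- ===== VERDICT (by name: the statement is the Claim_ definition above) =====
theorem human_distribution_spec : Claim_equal_human_distribution := by
  intro n _
  unfold Spec_human_distribution
  exact ports_agree n
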